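-- pv_equiv track=rewrite | github.com/DaveRoox/AdventOfCode | 2019/day3.py | find_cross_points
-- ===== SOURCE A (Python) =====
-- def find_cross_points(w1, w2):
--     cross_points = []
--     for (x1prev, y1prev), (x1, y1) in zip(w1, w1[1:]):
--         is_horizontal1 = y1 == y1prev
--         for (x2prev, y2prev), (x2, y2) in zip(w2, w2[1:]):
--             is_horizontal2 = y2 == y2prev
--             if is_horizontal1 == is_horizontal2:  # the wires are parallel
--                 continue
--             if is_horizontal1:  # wire2 is vertical
--                 y = y1
--                 ymin, ymax = min(y2prev, y2), max(y2prev, y2)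
--                 x = x2
--                 xmin, xmax = min(x1prev, x1), max(x1prev, x1)
--             else:  # wire1 is vertical
--                 y = y2
--                 ymin, ymax = min(y1prev, y1), max(y1prev, y1)
--                 x = x1
--                 xmin, xmax = min(x2prev, x2), max(x2prev, x2)
--             if xmin < x < xmax and ymin < y < ymax:
--                 cross_points.append((x, y))
--     return cross_points
-- ===== SOURCE B (Python) =====
-- def _bisect(xs, t, right):
--     # least index k with xs[k] > t (right=True) / xs[k] >= t (right=False); xs ascending
--     lo, hi = 0, len(xs)
--     while lo < hi:
--         mid = (lo + hi) // 2
--         if (xs[mid] <= t) if right else (xs[mid] < t):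
--             lo = mid + 1
--         else:
--             hi = mid
--     return lo
--
--
-- def find_cross_points(w1, w2):
--     # Index wire 2 once: classify its segments with their wire-order tag j,
--     # sort each class by the fixed coordinate for binary-searched range queries.
--     verts = []  # (x, ylo, yhi, j)
--     horzs = []  # (y, xlo, xhi, j)
--     for j, ((xp, yp), (x, y)) in enumerate(zip(w2, w2[1:])):
--         if y == yp:
--             horzs.append((y, min(xp, x), max(xp, x), j))
--         else:
--             verts.append((x, min(yp, y), max(yp, y), j))
--     verts.sort(key=lambda v: v[0])
--     horzs.sort(key=lambda h: h[0])
--     vxs = [v[0] for v in verts]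
--     hys = [h[0] for h in horzs]
--     res = []
--     for (xp, yp), (x, y) in zip(w1, w1[1:]):
--         if y == yp:  # horizontal: verticals whose x lies strictly inside (xlo, xhi)
--             xlo, xhi = min(xp, x), max(xp, x)
--             hits = [(j, vx, y)
--                     for vx, ylo, yhi, j in verts[_bisect(vxs, xlo, True):_bisect(vxs, xhi, False)]
--                     if ylo < y < yhi]
--         else:        # vertical: horizontals whose y lies strictly inside (ylo, yhi)
--             ylo, yhi = min(yp, y), max(yp, y)
--             hits = [(j, x, hy)
--                     for hy, xlo, xhi, j in horzs[_bisect(hys, ylo, True):_bisect(hys, yhi, False)]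
--                     if xlo < x < xhi]
--         hits.sort(key=lambda t: t[0])  # restore wire-2 order within this segment
--         res.extend((px, py) for _, px, py in hits)
--     return res
-- ===== Notes on version B (the rewrite author's own statement) =====
-- stated objective: faster
-- what changed: B replaces A's nested all-pairs scan by an indexed range-query algorithm: wire 2's segments are classified once with wire-order tags, each class is sorted by its fixed coordinate, every wire-1 segment binary-searches only the opposite-orientation candidates in its coordinate interval, and the hits are re-sorted by tag to restore A's output order.
import Mathlib
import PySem

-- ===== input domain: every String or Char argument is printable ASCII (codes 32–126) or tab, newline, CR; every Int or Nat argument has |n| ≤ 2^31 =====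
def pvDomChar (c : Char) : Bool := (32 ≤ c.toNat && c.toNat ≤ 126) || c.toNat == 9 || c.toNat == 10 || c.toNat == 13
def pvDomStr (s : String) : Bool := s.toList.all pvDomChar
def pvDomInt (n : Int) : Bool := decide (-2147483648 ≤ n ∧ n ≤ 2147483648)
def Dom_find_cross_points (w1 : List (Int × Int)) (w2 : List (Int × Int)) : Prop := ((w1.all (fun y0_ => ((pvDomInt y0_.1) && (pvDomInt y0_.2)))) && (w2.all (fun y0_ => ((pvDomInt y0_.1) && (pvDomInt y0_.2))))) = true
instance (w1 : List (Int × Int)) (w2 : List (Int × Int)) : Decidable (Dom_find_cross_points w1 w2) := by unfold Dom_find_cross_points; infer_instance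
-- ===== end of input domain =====

-- B replaces A's all-pairs scan: wire 2's segments are classified once with wire-order tags,
-- sorted by their fixed coordinate; each wire-1 segment binary-searches its coordinate interval
-- and the hits are re-sorted by tag to restore A's output order (measurably faster).


-- ===== PORT A =====
-- A's inner-loop body, named so the proofs can speak about one step
def fcpABody (seg1 : (Int × Int) × (Int × Int)) (acc2 : List (Int × Int))
    (seg2 : (Int × Int) × (Int × Int)) : List (Int × Int) :=
  let isH1 := seg1.2.2 == seg1.1.2
  let isH2 := seg2.2.2 == seg2.1.2
  if isH1 == isH2 then acc2
  else
    let y := if isH1 then seg1.2.2 else seg2.2.2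
    let ymin := if isH1 then min seg2.1.2 seg2.2.2 else min seg1.1.2 seg1.2.2
    let ymax := if isH1 then max seg2.1.2 seg2.2.2 else max seg1.1.2 seg1.2.2
    let x := if isH1 then seg2.2.1 else seg1.2.1
    let xmin := if isH1 then min seg1.1.1 seg1.2.1 else min seg2.1.1 seg2.2.1
    let xmax := if isH1 then max seg1.1.1 seg1.2.1 else max seg2.1.1 seg2.2.1
    if xmin < x ∧ x < xmax ∧ ymin < y ∧ y < ymax then acc2 ++ [(x, y)] else acc2

-- literal transliteration of A: nested foldl over consecutive-point pairs of both wires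
def find_cross_points (w1 : List (Int × Int)) (w2 : List (Int × Int)) : List (Int × Int) :=
  (List.zip w1 (PySem.List.slice w1 (some 1) none)).foldl (fun acc seg1 =>
    (List.zip w2 (PySem.List.slice w2 (some 1) none)).foldl (fcpABody seg1) acc) []

-- ===== PORT B =====
-- Source B's _bisect: least index k with xs[k] > t (right) / xs[k] >= t (not right), xs ascending
def fcpBis (xs : List Int) (t : Int) (right : Bool) (lo hi : Nat) : Nat :=
  if _h : lo < hi then
    -- mid = (lo + hi) // 2, written inline
    if (if right then xs.getD ((lo + hi) / 2) 0 ≤ t else xs.getD ((lo + hi) / 2) 0 < t) then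
      fcpBis xs t right ((lo + hi) / 2 + 1) hi
    else
      fcpBis xs t right lo ((lo + hi) / 2)
  else lo
termination_by hi - lo
decreasing_by all_goals omega

-- Source B's classification loop over enumerate(zip(w2, w2[1:])): (verts, horzs),
-- verts entries (x, ylo, yhi, j), horzs entries (y, xlo, xhi, j)
def fcpClassify (w2 : List (Int × Int)) :
    List (Int × Int × Int × Int) × List (Int × Int × Int × Int) :=
  (PySem.List.enumerate (List.zip w2 (PySem.List.slice w2 (some 1) none)) 0).foldl
    (fun acc js =>
      if js.2.2.2 == js.2.1.2 then
        (acc.1, acc.2 ++ [(js.2.2.2, min js.2.1.1 js.2.2.1, max js.2.1.1 js.2.2.1, js.1)])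
      else
        (acc.1 ++ [(js.2.2.1, min js.2.1.2 js.2.2.2, max js.2.1.2 js.2.2.2, js.1)], acc.2))
    ([], [])

-- Source B's main-loop body: binary-searched slice of the opposite-orientation class,
-- filtered, tagged, sorted by tag, appended to res
def fcpBBody (verts horzs : List (Int × Int × Int × Int)) (vxs hys : List Int)
    (res : List (Int × Int)) (seg : (Int × Int) × (Int × Int)) : List (Int × Int) :=
  let hits :=
    if seg.2.2 == seg.1.2 then
      ((PySem.List.slice verts
          (some ((fcpBis vxs (min seg.1.1 seg.2.1) true 0 vxs.length : Nat) : Int))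
          (some ((fcpBis vxs (max seg.1.1 seg.2.1) false 0 vxs.length : Nat) : Int))).filter
        (fun v => decide (v.2.1 < seg.2.2 ∧ seg.2.2 < v.2.2.1))).map
        (fun v => (v.2.2.2, v.1, seg.2.2))
    else
      ((PySem.List.slice horzs
          (some ((fcpBis hys (min seg.1.2 seg.2.2) true 0 hys.length : Nat) : Int))
          (some ((fcpBis hys (max seg.1.2 seg.2.2) false 0 hys.length : Nat) : Int))).filter
        (fun h => decide (h.2.1 < seg.2.1 ∧ seg.2.1 < h.2.2.1))).map
        (fun h => (h.2.2.2, seg.2.1, h.1))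
  res ++ (PySem.List.sorted hits (fun t => t.1)).map (fun t => t.2)

def find_cross_points_alt (w1 : List (Int × Int)) (w2 : List (Int × Int)) : List (Int × Int) :=
  let vh := fcpClassify w2
  let verts := PySem.List.sorted vh.1 (fun v => v.1)
  let horzs := PySem.List.sorted vh.2 (fun h => h.1)
  let vxs := verts.map (fun v => v.1)
  let hys := horzs.map (fun h => h.1)
  (List.zip w1 (PySem.List.slice w1 (some 1) none)).foldl (fcpBBody verts horzs vxs hys) []

-- ===== PRECONDITION & SPEC =====
def Spec_find_cross_points (w1 : List (Int × Int)) (w2 : List (Int × Int)) (out : List (Int × Int)) : Prop := out = find_cross_points_alt w1 w2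
instance (w1 : List (Int × Int)) (w2 : List (Int × Int)) (out : List (Int × Int)) : Decidable (Spec_find_cross_points w1 w2 out) := by unfold Spec_find_cross_points; infer_instance

-- ===== CLAIM (what is proved, stated in full; the proofs are below) =====
def Claim_equal_find_cross_points : Prop := ∀ (w1 : List (Int × Int)) (w2 : List (Int × Int)), Dom_find_cross_points w1 w2 → Spec_find_cross_points w1 w2 (find_cross_points w1 w2)

-- ===== LEMMAS AND PROOFS =====

-- the tagged vertical part of an enumerated segment list (Source B's verts before sorting)
def fcpVT (l : List (Int × ((Int × Int) × (Int × Int)))) : List (Int × Int × Int × Int) :=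
  (l.filter (fun s => !(s.2.2.2 == s.2.1.2))).map
    (fun s => (s.2.2.1, min s.2.1.2 s.2.2.2, max s.2.1.2 s.2.2.2, s.1))

-- the tagged horizontal part (Source B's horzs before sorting)
def fcpHT (l : List (Int × ((Int × Int) × (Int × Int)))) : List (Int × Int × Int × Int) :=
  (l.filter (fun s => s.2.2.2 == s.2.1.2)).map
    (fun s => (s.2.2.2, min s.2.1.1 s.2.2.1, max s.2.1.1 s.2.2.1, s.1))

theorem fcpClassify_fold_eq (l : List (Int × ((Int × Int) × (Int × Int))))
    (v h : List (Int × Int × Int × Int)) :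
    l.foldl (fun acc js =>
      if js.2.2.2 == js.2.1.2 then
        (acc.1, acc.2 ++ [(js.2.2.2, min js.2.1.1 js.2.2.1, max js.2.1.1 js.2.2.1, js.1)])
      else
        (acc.1 ++ [(js.2.2.1, min js.2.1.2 js.2.2.2, max js.2.1.2 js.2.2.2, js.1)], acc.2))
      (v, h)
    = (v ++ fcpVT l, h ++ fcpHT l) := by
  induction l generalizing v h with
  | nil => simp [fcpVT, fcpHT]
  | cons s l ih =>
    simp only [List.foldl_cons]
    by_cases hs : (s.2.2.2 == s.2.1.2) = true
    · rw [if_pos hs, ih]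
      simp [fcpVT, fcpHT, hs]
    · rw [if_neg hs, ih]
      simp only [Bool.not_eq_true] at hs
      simp [fcpVT, fcpHT, hs]

theorem fcpClassify_eq (w2 : List (Int × Int)) :
    fcpClassify w2 =
      (fcpVT (PySem.List.enumerate (List.zip w2 (PySem.List.slice w2 (some 1) none)) 0),
       fcpHT (PySem.List.enumerate (List.zip w2 (PySem.List.slice w2 (some 1) none)) 0)) := by
  unfold fcpClassify
  simpa using fcpClassify_fold_eq (PySem.List.enumerate (List.zip w2 (PySem.List.slice w2 (some 1) none)) 0) [] []

-- invariant proof for Source B's binary search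
theorem fcpBis_spec (xs : List Int) (t : Int) (right : Bool)
    (hs : xs.Pairwise (· ≤ ·)) :
    ∀ (n lo hi : Nat), hi - lo ≤ n → hi ≤ xs.length → lo ≤ hi →
    (∀ j (hj : j < xs.length), j < lo → (if right then xs[j] ≤ t else xs[j] < t)) →
    (∀ j (hj : j < xs.length), hi ≤ j → (if right then t < xs[j] else t ≤ xs[j])) →
    (∀ j (hj : j < xs.length), j < fcpBis xs t right lo hi → (if right then xs[j] ≤ t else xs[j] < t)) ∧
    (∀ j (hj : j < xs.length), fcpBis xs t right lo hi ≤ j → (if right then t < xs[j] else t ≤ xs[j])) := by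
  intro n
  induction n with
  | zero =>
    intro lo hi hn hlen hlh hbelow habove
    have : lo = hi := by omega
    subst this
    rw [fcpBis, dif_neg (by omega)]
    exact ⟨hbelow, habove⟩
  | succ n ih =>
    intro lo hi hn hlen hlh hbelow habove
    by_cases hlt : lo < hi
    · rw [fcpBis, dif_pos hlt]
      have hmidlo : lo ≤ (lo + hi) / 2 := by omega
      have hmidhi : (lo + hi) / 2 < hi := by omega
      have hmidlen : (lo + hi) / 2 < xs.length := by omega
      have hgetD : xs.getD ((lo + hi) / 2) 0 = xs[(lo + hi) / 2] :=
        List.getD_eq_getElem xs 0 hmidlen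
      have hpw := List.pairwise_iff_getElem.mp hs
      by_cases hc : (if right = true then xs.getD ((lo + hi) / 2) 0 ≤ t else xs.getD ((lo + hi) / 2) 0 < t)
      · rw [if_pos hc]
        refine ih ((lo + hi) / 2 + 1) hi (by omega) hlen (by omega) ?_ habove
        intro j hj hjlt
        have hle : xs[j] ≤ xs[(lo + hi) / 2] := by
          rcases Nat.lt_or_ge j ((lo + hi) / 2) with h | h
          · exact hpw j ((lo + hi) / 2) hj hmidlen h
          · have : j = (lo + hi) / 2 := by omega
            subst this; exact le_refl _
        cases right with
        | true =>
          rw [if_pos rfl] at hc ⊢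
          rw [hgetD] at hc
          omega
        | false =>
          rw [if_neg Bool.false_ne_true] at hc ⊢
          rw [hgetD] at hc
          omega
      · rw [if_neg hc]
        refine ih lo ((lo + hi) / 2) (by omega) (by omega) (by omega) hbelow ?_
        intro j hj hjge
        have hge : xs[(lo + hi) / 2] ≤ xs[j] := by
          rcases Nat.lt_or_ge ((lo + hi) / 2) j with h | h
          · exact hpw ((lo + hi) / 2) j hmidlen hj h
          · have : j = (lo + hi) / 2 := by omega
            subst this; exact le_refl _
        cases right with
        | true =>
          rw [if_pos rfl] at hc ⊢
          rw [hgetD] at hc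
          omega
        | false =>
          rw [if_neg Bool.false_ne_true] at hc ⊢
          rw [hgetD] at hc
          omega
    · rw [fcpBis, dif_neg hlt]
      have : lo = hi := by omega
      subst this
      exact ⟨hbelow, habove⟩

-- a filter whose predicate holds exactly on an index window is the corresponding drop/take
theorem filter_eq_drop_take {α : Type} (p : α → Bool) :
    ∀ (l : List α) (a b : Nat),
    (∀ j (hj : j < l.length), p l[j] = decide (a ≤ j ∧ j < b)) →
    l.filter p = (l.drop a).take (b - a) := by
  intro l
  induction l with
  | nil => intro a b _; simp
  | cons x tl ih =>
    intro a b h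
    have h0 : p x = decide (a ≤ 0 ∧ 0 < b) := h 0 (by simp)
    have htl : ∀ j (hj : j < tl.length), p tl[j] = decide (a - 1 ≤ j ∧ j < b - 1) := by
      intro j hj
      have := h (j + 1) (by simp; omega)
      simp only [List.getElem_cons_succ] at this
      rw [this]
      by_cases hab : a ≤ j + 1 ∧ j + 1 < b
      · rw [decide_eq_true_iff.mpr hab, Eq.comm, decide_eq_true_iff]; omega
      · rw [decide_eq_false hab, Eq.comm, decide_eq_false_iff_not]; omega
    have hrec := ih (a - 1) (b - 1) htl
    rcases a with _ | a
    · rcases b with _ | b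
      · rw [List.filter_cons_of_neg (by rw [h0]; simp)]
        simpa using hrec
      · rw [List.filter_cons_of_pos (by rw [h0]; simp)]
        simp only [Nat.zero_sub, Nat.add_sub_cancel, Nat.sub_zero, List.drop_zero] at hrec
        simp only [Nat.sub_zero, List.drop_zero, List.take_succ_cons]
        rw [hrec]
    · rw [List.filter_cons_of_neg (by rw [h0]; simp)]
      rw [List.drop_succ_cons]
      simp only [Nat.add_sub_cancel] at hrec
      rw [hrec]
      congr 1
      omega

-- Source B's bisected slice of a fst-sorted list is its open-interval filter
theorem slice_filter_eq (verts : List (Int × Int × Int × Int))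
    (hs : verts.Pairwise (fun a b => a.1 ≤ b.1)) (tlo thi : Int) :
    PySem.List.slice verts
      (some ((fcpBis (verts.map (fun v => v.1)) tlo true 0 (verts.map (fun v => v.1)).length : Nat) : Int))
      (some ((fcpBis (verts.map (fun v => v.1)) thi false 0 (verts.map (fun v => v.1)).length : Nat) : Int))
    = verts.filter (fun v => decide (tlo < v.1 ∧ v.1 < thi)) := by
  have hsx : (verts.map (fun v => v.1)).Pairwise (· ≤ ·) := List.pairwise_map.mpr hs
  have spec1 := fcpBis_spec (verts.map (fun v => v.1)) tlo true hsx
      (verts.map (fun v => v.1)).length 0 (verts.map (fun v => v.1)).length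
      (by omega) (le_refl _) (by omega) (by intro j hj hlt; omega) (by intro j hj hge; omega)
  have spec2 := fcpBis_spec (verts.map (fun v => v.1)) thi false hsx
      (verts.map (fun v => v.1)).length 0 (verts.map (fun v => v.1)).length
      (by omega) (le_refl _) (by omega) (by intro j hj hlt; omega) (by intro j hj hge; omega)
  rw [PySem.List.slice_natCast]
  refine (filter_eq_drop_take _ verts _ _ ?_).symm
  intro j hj
  have hjx : j < (verts.map (fun v => v.1)).length := by simpa using hj
  have hget : (verts.map (fun v => v.1))[j] = verts[j].1 := List.getElem_map _
  by_cases hin : tlo < verts[j].1 ∧ verts[j].1 < thi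
  · rw [decide_eq_true_iff.mpr hin, Eq.comm, decide_eq_true_iff]
    constructor
    · by_contra hlt
      have := spec1.1 j hjx (by omega)
      rw [if_pos rfl, hget] at this; omega
    · by_contra hge
      have := spec2.2 j hjx (by omega)
      rw [if_neg Bool.false_ne_true, hget] at this; omega
  · rw [decide_eq_false hin, Eq.comm, decide_eq_false_iff_not]
    intro ⟨h1, h2⟩
    apply hin
    have ha := spec1.2 j hjx h1
    have hb := spec2.1 j hjx h2
    rw [if_pos rfl, hget] at ha
    rw [if_neg Bool.false_ne_true, hget] at hb
    exact ⟨ha, hb⟩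

-- one A-step, by orientation of the pair
theorem fcpABody_hh (seg1 s : (Int × Int) × (Int × Int)) (acc : List (Int × Int))
    (h1 : (seg1.2.2 == seg1.1.2) = true) (h2 : (s.2.2 == s.1.2) = true) :
    fcpABody seg1 acc s = acc := by
  unfold fcpABody; rw [h1, h2]; rfl

theorem fcpABody_vv (seg1 s : (Int × Int) × (Int × Int)) (acc : List (Int × Int))
    (h1 : (seg1.2.2 == seg1.1.2) = false) (h2 : (s.2.2 == s.1.2) = false) :
    fcpABody seg1 acc s = acc := by
  unfold fcpABody; rw [h1, h2]; rfl

theorem fcpABody_hv (seg1 s : (Int × Int) × (Int × Int)) (acc : List (Int × Int))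
    (h1 : (seg1.2.2 == seg1.1.2) = true) (h2 : (s.2.2 == s.1.2) = false) :
    fcpABody seg1 acc s =
      if min seg1.1.1 seg1.2.1 < s.2.1 ∧ s.2.1 < max seg1.1.1 seg1.2.1 ∧
         min s.1.2 s.2.2 < seg1.2.2 ∧ seg1.2.2 < max s.1.2 s.2.2
      then acc ++ [(s.2.1, seg1.2.2)] else acc := by
  unfold fcpABody; rw [h1, h2]; rfl

theorem fcpABody_vh (seg1 s : (Int × Int) × (Int × Int)) (acc : List (Int × Int))
    (h1 : (seg1.2.2 == seg1.1.2) = false) (h2 : (s.2.2 == s.1.2) = true) :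
    fcpABody seg1 acc s =
      if min s.1.1 s.2.1 < seg1.2.1 ∧ seg1.2.1 < max s.1.1 s.2.1 ∧
         min seg1.1.2 seg1.2.2 < s.2.2 ∧ s.2.2 < max seg1.1.2 seg1.2.2
      then acc ++ [(seg1.2.1, s.2.2)] else acc := by
  unfold fcpABody; rw [h1, h2]; rfl

-- A's full condition on a tagged vertical entry, for a horizontal seg1 (B's filter shape)
def fcpCondH (seg1 : (Int × Int) × (Int × Int)) (v : Int × Int × Int × Int) : Bool :=
  decide (min seg1.1.1 seg1.2.1 < v.1 ∧ v.1 < max seg1.1.1 seg1.2.1 ∧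
          v.2.1 < seg1.2.2 ∧ seg1.2.2 < v.2.2.1)

-- and on a tagged horizontal entry, for a vertical seg1
def fcpCondV (seg1 : (Int × Int) × (Int × Int)) (h : Int × Int × Int × Int) : Bool :=
  decide (h.2.1 < seg1.2.1 ∧ seg1.2.1 < h.2.2.1 ∧
          min seg1.1.2 seg1.2.2 < h.1 ∧ h.1 < max seg1.1.2 seg1.2.2)

-- A's inner loop for a horizontal wire-1 segment = filter/map over the tagged verticals
theorem inner_h (seg1 : (Int × Int) × (Int × Int)) (hH : (seg1.2.2 == seg1.1.2) = true)
    (l : List (Int × ((Int × Int) × (Int × Int)))) (acc : List (Int × Int)) :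
    (l.map (fun s => s.2)).foldl (fcpABody seg1) acc
    = acc ++ ((fcpVT l).filter (fcpCondH seg1)).map (fun v => (v.1, seg1.2.2)) := by
  induction l generalizing acc with
  | nil => simp [fcpVT]
  | cons s l ih =>
    simp only [List.map_cons, List.foldl_cons]
    by_cases hs : (s.2.2.2 == s.2.1.2) = true
    · rw [fcpABody_hh seg1 s.2 acc hH hs, ih]
      simp [fcpVT, hs]
    · have hs' : (s.2.2.2 == s.2.1.2) = false := by simpa using hs
      rw [fcpABody_hv seg1 s.2 acc hH hs', ih]
      have hv : fcpVT (s :: l)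
          = (s.2.2.1, min s.2.1.2 s.2.2.2, max s.2.1.2 s.2.2.2, s.1) :: fcpVT l := by
        simp [fcpVT, hs']
      rw [hv]
      by_cases hc : (min seg1.1.1 seg1.2.1 < s.2.2.1 ∧ s.2.2.1 < max seg1.1.1 seg1.2.1 ∧
          min s.2.1.2 s.2.2.2 < seg1.2.2 ∧ seg1.2.2 < max s.2.1.2 s.2.2.2)
      · rw [if_pos hc, List.filter_cons_of_pos (by simpa [fcpCondH] using hc), List.map_cons]
        rw [List.append_assoc, List.singleton_append]
      · rw [if_neg hc, List.filter_cons_of_neg (by simpa [fcpCondH] using hc)]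

-- A's inner loop for a vertical wire-1 segment = filter/map over the tagged horizontals
theorem inner_v (seg1 : (Int × Int) × (Int × Int)) (hH : (seg1.2.2 == seg1.1.2) = false)
    (l : List (Int × ((Int × Int) × (Int × Int)))) (acc : List (Int × Int)) :
    (l.map (fun s => s.2)).foldl (fcpABody seg1) acc
    = acc ++ ((fcpHT l).filter (fcpCondV seg1)).map (fun h => (seg1.2.1, h.1)) := by
  induction l generalizing acc with
  | nil => simp [fcpHT]
  | cons s l ih =>
    simp only [List.map_cons, List.foldl_cons]
    by_cases hs : (s.2.2.2 == s.2.1.2) = true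
    · rw [fcpABody_vh seg1 s.2 acc hH hs, ih]
      have hh : fcpHT (s :: l)
          = (s.2.2.2, min s.2.1.1 s.2.2.1, max s.2.1.1 s.2.2.1, s.1) :: fcpHT l := by
        simp [fcpHT, hs]
      rw [hh]
      by_cases hc : (min s.2.1.1 s.2.2.1 < seg1.2.1 ∧ seg1.2.1 < max s.2.1.1 s.2.2.1 ∧
          min seg1.1.2 seg1.2.2 < s.2.2.2 ∧ s.2.2.2 < max seg1.1.2 seg1.2.2)
      · rw [if_pos hc, List.filter_cons_of_pos (by simpa [fcpCondV] using hc), List.map_cons]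
        rw [List.append_assoc, List.singleton_append]
      · rw [if_neg hc, List.filter_cons_of_neg (by simpa [fcpCondV] using hc)]
    · have hs' : (s.2.2.2 == s.2.1.2) = false := by simpa using hs
      rw [fcpABody_vv seg1 s.2 acc hH hs', ih]
      simp [fcpHT, hs']

-- proof-side names for Source B's preprocessed data
def fcpE2 (w2 : List (Int × Int)) : List (Int × ((Int × Int) × (Int × Int))) :=
  PySem.List.enumerate (List.zip w2 (PySem.List.slice w2 (some 1) none)) 0

def fcpVerts (w2 : List (Int × Int)) : List (Int × Int × Int × Int) :=
  PySem.List.sorted (fcpVT (fcpE2 w2)) (fun v => v.1)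

def fcpHorzs (w2 : List (Int × Int)) : List (Int × Int × Int × Int) :=
  PySem.List.sorted (fcpHT (fcpE2 w2)) (fun h => h.1)

-- one B-step for a horizontal wire-1 segment is A's tagged block, stripped
theorem block_h (w2 : List (Int × Int)) (seg : (Int × Int) × (Int × Int))
    (hH : (seg.2.2 == seg.1.2) = true) (res : List (Int × Int)) :
    fcpBBody (fcpVerts w2) (fcpHorzs w2) ((fcpVerts w2).map (fun v => v.1))
      ((fcpHorzs w2).map (fun h => h.1)) res seg
    = res ++ ((fcpVT (fcpE2 w2)).filter (fcpCondH seg)).map (fun v => (v.1, seg.2.2)) := by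
  have hsv : (fcpVerts w2).Pairwise (fun a b => a.1 ≤ b.1) :=
    PySem.List.sorted_pairwise (fcpVT (fcpE2 w2)) (fun v => v.1)
  simp only [fcpBBody, hH, ite_true]
  rw [slice_filter_eq (fcpVerts w2) hsv, List.filter_filter]
  rw [List.filter_congr (fun v _ => by
    rw [Bool.eq_iff_iff]
    simp only [fcpCondH, Bool.and_eq_true, decide_eq_true_eq]
    tauto : ∀ v ∈ fcpVerts w2, _ = fcpCondH seg v)]
  have h1 : (fcpE2 w2).Pairwise (fun p q => p.1 < q.1) :=
    PySem.List.pairwise_lt_enumerate _ 0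
  have h2 : (fcpVT (fcpE2 w2)).Pairwise (fun a b => a.2.2.2 < b.2.2.2) :=
    List.pairwise_map.mpr (h1.filter _)
  have h3 : (((fcpVT (fcpE2 w2)).filter (fcpCondH seg)).map
      (fun v => (v.2.2.2, v.1, seg.2.2))).Pairwise (fun a b => a.1 < b.1) :=
    List.pairwise_map.mpr (h2.filter (fcpCondH seg))
  have hperm : (((fcpVT (fcpE2 w2)).filter (fcpCondH seg)).map
      (fun v => (v.2.2.2, v.1, seg.2.2))).Perm
      (((fcpVerts w2).filter (fcpCondH seg)).map (fun v => (v.2.2.2, v.1, seg.2.2))) :=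
    (((PySem.List.sorted_perm (fcpVT (fcpE2 w2)) (fun v => v.1) false).symm.filter
      (fcpCondH seg)).map _)
  rw [PySem.List.sorted_eq_of_perm_of_pairwise_lt _ _ _ hperm h3, List.map_map]
  rfl

-- one B-step for a vertical wire-1 segment
theorem block_v (w2 : List (Int × Int)) (seg : (Int × Int) × (Int × Int))
    (hH : (seg.2.2 == seg.1.2) = false) (res : List (Int × Int)) :
    fcpBBody (fcpVerts w2) (fcpHorzs w2) ((fcpVerts w2).map (fun v => v.1))
      ((fcpHorzs w2).map (fun h => h.1)) res seg
    = res ++ ((fcpHT (fcpE2 w2)).filter (fcpCondV seg)).map (fun h => (seg.2.1, h.1)) := by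
  have hsh : (fcpHorzs w2).Pairwise (fun a b => a.1 ≤ b.1) :=
    PySem.List.sorted_pairwise (fcpHT (fcpE2 w2)) (fun h => h.1)
  simp only [fcpBBody, hH, Bool.false_eq_true, if_false]
  rw [slice_filter_eq (fcpHorzs w2) hsh, List.filter_filter]
  rw [List.filter_congr (fun h _ => by
    rw [Bool.eq_iff_iff]
    simp only [fcpCondV, Bool.and_eq_true, decide_eq_true_eq]
    tauto : ∀ h ∈ fcpHorzs w2, _ = fcpCondV seg h)]
  have h1 : (fcpE2 w2).Pairwise (fun p q => p.1 < q.1) :=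
    PySem.List.pairwise_lt_enumerate _ 0
  have h2 : (fcpHT (fcpE2 w2)).Pairwise (fun a b => a.2.2.2 < b.2.2.2) :=
    List.pairwise_map.mpr (h1.filter _)
  have h3 : (((fcpHT (fcpE2 w2)).filter (fcpCondV seg)).map
      (fun h => (h.2.2.2, seg.2.1, h.1))).Pairwise (fun a b => a.1 < b.1) :=
    List.pairwise_map.mpr (h2.filter (fcpCondV seg))
  have hperm : (((fcpHT (fcpE2 w2)).filter (fcpCondV seg)).map
      (fun h => (h.2.2.2, seg.2.1, h.1))).Perm
      (((fcpHorzs w2).filter (fcpCondV seg)).map (fun h => (h.2.2.2, seg.2.1, h.1))) :=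
    (((PySem.List.sorted_perm (fcpHT (fcpE2 w2)) (fun h => h.1) false).symm.filter
      (fcpCondV seg)).map _)
  rw [PySem.List.sorted_eq_of_perm_of_pairwise_lt _ _ _ hperm h3, List.map_map]
  rfl

-- A's nested loop equals B's loop over the preprocessed index of wire 2
theorem outer_eq (w2 : List (Int × Int)) :
    ∀ (l1 : List ((Int × Int) × (Int × Int))) (acc : List (Int × Int)),
    l1.foldl (fun acc seg1 =>
      (List.zip w2 (PySem.List.slice w2 (some 1) none)).foldl (fcpABody seg1) acc) acc
    = l1.foldl (fcpBBody (fcpVerts w2) (fcpHorzs w2) ((fcpVerts w2).map (fun v => v.1))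
        ((fcpHorzs w2).map (fun h => h.1))) acc := by
  intro l1
  induction l1 with
  | nil => intro acc; rfl
  | cons s l1 ih =>
    intro acc
    simp only [List.foldl_cons]
    have hz : List.zip w2 (PySem.List.slice w2 (some 1) none)
        = (fcpE2 w2).map (fun s => s.2) :=
      (PySem.List.map_snd_enumerate _ 0).symm
    by_cases hs : (s.2.2 == s.1.2) = true
    · rw [hz, inner_h s hs (fcpE2 w2) acc, block_h w2 s hs acc, ← hz]
      exact ih _
    · have hs' : (s.2.2 == s.1.2) = false := by simpa using hs
      rw [hz, inner_v s hs' (fcpE2 w2) acc, block_v w2 s hs' acc, ← hz]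
      exact ih _

-- ===== VERDICT (by name: the statement is the Claim_ definition above) =====
theorem find_cross_points_spec : Claim_equal_find_cross_points := by
  intro w1 w2 _
  unfold Spec_find_cross_points find_cross_points find_cross_points_alt
  rw [fcpClassify_eq]
  exact outer_eq w2 _ []
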